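-- pv_equiv track=rewrite | github.com/ckoons/BubbleSpacetimeTheory | play/toy_989_prime_reachability_map.py | factorize_7smooth
-- ===== SOURCE A (Python) =====
-- def factorize_7smooth(n):
--     """Return dict {prime: exponent} for 7-smooth n."""
--     factors = {}
--     for p in [2, 3, 5, 7]:
--         e = 0
--         while n % p == 0:
--             n //= p
--             e += 1
--         if e > 0:
--             factors[p] = e
--     return factors if n == 1 else None
-- ===== SOURCE B (Python) =====
-- def factorize_7smooth(n):
--     """Return dict {prime: exponent} for 7-smooth n."""
--     factors = {}
--     while n != 1:
--         p = next((q for q in [2, 3, 5, 7] if n % q == 0), None)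
--         if p is None:
--             return None
--         n //= p
--         factors[p] = factors.get(p, 0) + 1
--     return factors
-- ===== Notes on version B (the rewrite author's own statement) =====
-- stated objective: alternative
-- what changed: B replaces A's per-prime exhaustion (for each prime in [2,3,5,7], an inner while dividing it out fully) by a single while-loop that repeatedly finds the first prime in [2,3,5,7] dividing n, removes one factor and counts it in the dict, returning None as soon as no prime divides a value != 1.
import Mathlib
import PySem

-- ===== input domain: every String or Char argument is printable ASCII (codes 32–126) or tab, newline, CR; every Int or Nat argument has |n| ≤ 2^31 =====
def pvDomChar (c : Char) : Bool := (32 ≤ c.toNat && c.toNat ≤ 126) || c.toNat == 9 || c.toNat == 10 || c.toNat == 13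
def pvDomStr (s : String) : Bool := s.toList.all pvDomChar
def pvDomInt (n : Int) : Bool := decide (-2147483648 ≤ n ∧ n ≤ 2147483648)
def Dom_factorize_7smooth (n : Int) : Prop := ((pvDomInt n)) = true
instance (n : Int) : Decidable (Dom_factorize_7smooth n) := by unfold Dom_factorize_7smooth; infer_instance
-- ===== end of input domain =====

-- B rewrites A's per-prime exhaustion as a single loop removing one smallest prime factor
-- at a time (objective: alternative decomposition, same asymptotic cost).

-- termination measure fact cited by both ports' decreasing_by
theorem pvFloordivAbsLt {p n : Int} (hp : 2 ≤ p) (hn : n ≠ 0) (hdvd : p ∣ n) :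
    (PySem.Int.floordiv n p).natAbs < n.natAbs := by
  rw [PySem.Int.floordiv_eq_ediv_of_pos (by omega)]
  obtain ⟨c, rfl⟩ := hdvd
  rw [Int.mul_ediv_cancel_left _ (by omega)]
  have hc : c ≠ 0 := by rintro rfl; simp at hn
  have h1 : 1 ≤ c.natAbs := by omega
  have h2 : 2 ≤ p.natAbs := by omega
  calc c.natAbs < p.natAbs * c.natAbs := by nlinarith
    _ = (p * c).natAbs := (Int.natAbs_mul p c).symm

-- ===== PORT A =====
-- inner 'while n % p == 0: n //= p; e += 1'; the '2 ≤ p ∧ n ≠ 0' conjuncts of the guard only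
-- make the loop total in Lean (Python diverges at n = 0, excluded by Pre_; p is always in [2,3,5,7])
def pvDivLoopA (p n e : Int) : Int × Int :=
  if h : 2 ≤ p ∧ n ≠ 0 ∧ PySem.Int.mod n p = 0 then
    pvDivLoopA p (PySem.Int.floordiv n p) (e + 1)
  else (n, e)
termination_by n.natAbs
decreasing_by
  exact pvFloordivAbsLt h.1 h.2.1 ((PySem.Int.mod_eq_zero_iff_dvd n p).mp h.2.2)

def factorize_7smooth (n : Int) : Option (List (Int × Int)) :=
  let st := [(2 : Int), 3, 5, 7].foldl
    (fun (st : Int × PySem.Dict Int Int) p =>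
      let r := pvDivLoopA p st.1 0
      (r.1, if r.2 > 0 then st.2.insert p r.2 else st.2))
    (n, PySem.Dict.empty)
  if st.1 = 1 then some st.2.items else none

-- ===== PORT B =====
-- 'while n != 1: find first p in [2,3,5,7] with n % p == 0 (else return None); n //= p;
-- factors[p] = factors.get(p,0)+1'; the '2 ≤ p ∧ n ≠ 0' guard only makes it total in Lean
def pvLoopB (n : Int) (d : PySem.Dict Int Int) : Option (List (Int × Int)) :=
  if n = 1 then some d.items
  else
    match hf : [(2 : Int), 3, 5, 7].find? (fun p => PySem.Int.mod n p = 0) with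
    | none => none
    | some p =>
      if h : 2 ≤ p ∧ n ≠ 0 then
        pvLoopB (PySem.Int.floordiv n p) (d.insert p (d.getD p 0 + 1))
      else none
termination_by n.natAbs
decreasing_by
  have hm : PySem.Int.mod n p = 0 := by simpa using List.find?_some hf
  exact pvFloordivAbsLt h.1 h.2 ((PySem.Int.mod_eq_zero_iff_dvd n p).mp hm)

def factorize_7smooth_alt (n : Int) : Option (List (Int × Int)) :=
  pvLoopB n PySem.Dict.empty

-- ===== PRECONDITION & SPEC =====
-- Pre_ excludes only n = 0, on which the Python A loops forever (0 % 2 == 0 indefinitely)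
-- and never returns (B loops forever there too).
def Pre_factorize_7smooth (n : Int) : Prop := n ≠ 0
instance (n : Int) : Decidable (Pre_factorize_7smooth n) := by unfold Pre_factorize_7smooth; infer_instance
def pvWitness_factorize_7smooth : Int := 12

def Spec_factorize_7smooth (n : Int) (out : Option (List (Int × Int))) : Prop := out = factorize_7smooth_alt n
instance (n : Int) (out : Option (List (Int × Int))) : Decidable (Spec_factorize_7smooth n out) := by unfold Spec_factorize_7smooth; infer_instance

-- ===== CLAIM (what is proved, stated in full; the proofs are below) =====
def Claim_equal_factorize_7smooth : Prop := ∀ (n : Int), Dom_factorize_7smooth n → Pre_factorize_7smooth n → Spec_factorize_7smooth n (factorize_7smooth n)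

-- ===== LEMMAS AND PROOFS =====

-- A's remaining computation after some prefix of the primes has been fully processed
def pvRunA (ps : List Int) (n : Int) (d : PySem.Dict Int Int) : Option (List (Int × Int)) :=
  let st := ps.foldl
    (fun (st : Int × PySem.Dict Int Int) p =>
      let r := pvDivLoopA p st.1 0
      (r.1, if r.2 > 0 then st.2.insert p r.2 else st.2))
    (n, d)
  if st.1 = 1 then some st.2.items else none

theorem pvRunA_eq (n : Int) : factorize_7smooth n = pvRunA [2, 3, 5, 7] n PySem.Dict.empty := rfl

theorem pvRunA_cons (p : Int) (ps : List Int) (n : Int) (d : PySem.Dict Int Int) :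
    pvRunA (p :: ps) n d =
      pvRunA ps (pvDivLoopA p n 0).1
        (if (pvDivLoopA p n 0).2 > 0 then d.insert p (pvDivLoopA p n 0).2 else d) := rfl

theorem pv_not_dvd_one {p : Int} (hp : 2 ≤ p) : ¬ p ∣ (1 : Int) := by
  intro h
  have := Int.le_of_dvd (by norm_num) h
  omega

theorem pvDivLoopA_one {p : Int} (hp : 2 ≤ p) (e : Int) : pvDivLoopA p 1 e = (1, e) := by
  rw [pvDivLoopA]
  have : ¬ PySem.Int.mod 1 p = 0 := fun h =>
    pv_not_dvd_one hp ((PySem.Int.mod_eq_zero_iff_dvd 1 p).mp h)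
  simp [this]

theorem pvRunA_one (ps : List Int) (d : PySem.Dict Int Int)
    (hps : ∀ q ∈ ps, 2 ≤ q) : pvRunA ps 1 d = some d.items := by
  induction ps generalizing d with
  | nil => simp [pvRunA]
  | cons p ps ih =>
    have h1 := pvDivLoopA_one (hps p (by simp)) 0
    simp only [pvRunA_cons, h1]
    exact ih d (fun q hq => hps q (by simp [hq]))

theorem pvDivLoopA_unfold_pos {p n : Int} (hp : 2 ≤ p) (hn : n ≠ 0) (hdvd : p ∣ n) (e : Int) :
    pvDivLoopA p n e = pvDivLoopA p (PySem.Int.floordiv n p) (e + 1) := by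
  rw [pvDivLoopA]
  exact dif_pos ⟨hp, hn, (PySem.Int.mod_eq_zero_iff_dvd n p).mpr hdvd⟩

theorem pvDivLoopA_unfold_neg {p n : Int} (hdvd : ¬ p ∣ n) (e : Int) :
    pvDivLoopA p n e = (n, e) := by
  rw [pvDivLoopA]
  have : ¬ PySem.Int.mod n p = 0 := fun h => hdvd ((PySem.Int.mod_eq_zero_iff_dvd n p).mp h)
  simp [this]

theorem pvDivLoopA_stop {p n : Int} (hg : ¬ (2 ≤ p ∧ n ≠ 0 ∧ PySem.Int.mod n p = 0)) (e : Int) :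
    pvDivLoopA p n e = (n, e) := by
  rw [pvDivLoopA]
  exact dif_neg hg

theorem pvDivLoopA_shift (p : Int) : ∀ (k : Nat) (n : Int), n.natAbs ≤ k → ∀ e,
    pvDivLoopA p n e = ((pvDivLoopA p n 0).1, e + (pvDivLoopA p n 0).2) := by
  intro k
  induction k with
  | zero =>
    intro n hk e
    have hn : n = 0 := by omega
    subst hn
    have hg : ¬ ((2:Int) ≤ p ∧ (0:Int) ≠ 0 ∧ PySem.Int.mod 0 p = 0) := by simp
    rw [pvDivLoopA_stop hg e, pvDivLoopA_stop hg 0]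
    simp
  | succ k ih =>
    intro n hk e
    by_cases hg : 2 ≤ p ∧ n ≠ 0 ∧ PySem.Int.mod n p = 0
    · have hdvd := (PySem.Int.mod_eq_zero_iff_dvd n p).mp hg.2.2
      have hlt := pvFloordivAbsLt hg.1 hg.2.1 hdvd
      have hk' : (PySem.Int.floordiv n p).natAbs ≤ k := by omega
      rw [pvDivLoopA_unfold_pos hg.1 hg.2.1 hdvd e, pvDivLoopA_unfold_pos hg.1 hg.2.1 hdvd 0,
        ih _ hk' (e + 1), ih _ hk' (0 + 1)]
      simp
      ring
    · rw [pvDivLoopA_stop hg e, pvDivLoopA_stop hg 0]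
      simp

theorem pvDivLoopA_snd_nonneg (p : Int) : ∀ (k : Nat) (n : Int), n.natAbs ≤ k →
    0 ≤ (pvDivLoopA p n 0).2 := by
  intro k
  induction k with
  | zero =>
    intro n hk
    have hn : n = 0 := by omega
    subst hn
    rw [pvDivLoopA_stop (by simp) 0]
  | succ k ih =>
    intro n hk
    by_cases hg : 2 ≤ p ∧ n ≠ 0 ∧ PySem.Int.mod n p = 0
    · have hdvd := (PySem.Int.mod_eq_zero_iff_dvd n p).mp hg.2.2
      have hlt := pvFloordivAbsLt hg.1 hg.2.1 hdvd
      have hk' : (PySem.Int.floordiv n p).natAbs ≤ k := by omega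
      rw [pvDivLoopA_unfold_pos hg.1 hg.2.1 hdvd 0,
        pvDivLoopA_shift p k _ hk' (0 + 1)]
      have := ih _ hk'
      simp
      omega
    · rw [pvDivLoopA_stop hg 0]

theorem pv_mem_full {x : Int} (hx : x ∈ [(2 : Int), 3, 5, 7]) : 2 ≤ x := by
  have h : x = 2 ∨ x = 3 ∨ x = 5 ∨ x = 7 := by simpa using hx
  rcases h with rfl | rfl | rfl | rfl <;> norm_num

theorem pvLoopB_none {n : Int} (hn1 : n ≠ 1)
    (hf : [(2 : Int), 3, 5, 7].find? (fun x => PySem.Int.mod n x = 0) = none)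
    (d : PySem.Dict Int Int) : pvLoopB n d = none := by
  rw [pvLoopB, if_neg hn1]
  split
  · rfl
  · rename_i q heq
    rw [hf] at heq
    cases heq

theorem pvLoopB_step {n p : Int} (hn1 : n ≠ 1)
    (hf : [(2 : Int), 3, 5, 7].find? (fun x => PySem.Int.mod n x = 0) = some p)
    (h : 2 ≤ p ∧ n ≠ 0) (d : PySem.Dict Int Int) :
    pvLoopB n d = pvLoopB (PySem.Int.floordiv n p) (d.insert p (d.getD p 0 + 1)) := by
  rw [pvLoopB, if_neg hn1]
  split
  · rename_i heq
    rw [hf] at heq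
    cases heq
  · rename_i q heq
    rw [hf] at heq
    injection heq with h2
    subst h2
    rw [dif_pos h]

theorem pvLoopB_eq_runA : ∀ (ps qs : List Int) (n : Int) (d : PySem.Dict Int Int),
    n ≠ 0 →
    qs ++ ps = [2, 3, 5, 7] →
    (∀ q ∈ qs, ¬ q ∣ n) →
    (∀ p ∈ ps, d.contains p = false) →
    pvLoopB n d = pvRunA ps n d := by
  intro ps
  induction ps with
  | nil =>
    intro qs n d hn hsplit hqs _
    by_cases hn1 : n = 1
    · subst hn1
      rw [pvLoopB, pvRunA]
      simp
    · have hfind : [(2 : Int), 3, 5, 7].find? (fun p => PySem.Int.mod n p = 0) = none := by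
        apply List.find?_eq_none.mpr
        intro x hx
        have hx' : x ∈ qs := by
          have : x ∈ qs ++ ([] : List Int) := by rw [hsplit]; exact hx
          simpa using this
        simp [PySem.Int.mod_eq_zero_iff_dvd]
        exact hqs x hx'
      rw [pvLoopB_none hn1 hfind d, pvRunA]
      simp only [List.foldl_nil]
      rw [if_neg hn1]
  | cons p ps' ih =>
    intro qs n d hn hsplit hqs hd
    have hp2 : 2 ≤ p := pv_mem_full (by rw [← hsplit]; simp)
    have hps'2 : ∀ q ∈ ps', 2 ≤ q := fun q hq => pv_mem_full (by rw [← hsplit]; simp [hq])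
    have hnodup : (qs ++ p :: ps').Nodup := by rw [hsplit]; decide
    have hpps' : p ∉ ps' := by
      have h1 : (p :: ps').Nodup := hnodup.of_append_right
      exact (List.nodup_cons.mp h1).1
    have hsplit' : (qs ++ [p]) ++ ps' = [2, 3, 5, 7] := by simpa using hsplit
    have hqsnone : ∀ (m : Int), (∀ q ∈ qs, ¬ q ∣ m) →
        qs.find? (fun x => PySem.Int.mod m x = 0) = none := by
      intro m hq
      apply List.find?_eq_none.mpr
      intro x hx
      simp [PySem.Int.mod_eq_zero_iff_dvd]
      exact hq x hx
    by_cases hn1 : n = 1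
    · subst hn1
      rw [pvLoopB, if_pos rfl]
      exact (pvRunA_one (p :: ps') d (by intro q hq; exact pv_mem_full (by rw [← hsplit]; simp [hq]))).symm
    by_cases hdvd : p ∣ n
    · -- B removes one factor p; the inner counter lemma tracks A's partially run p-loop
      have hfindsome : ∀ (m : Int), (∀ q ∈ qs, ¬ q ∣ m) → p ∣ m →
          [(2 : Int), 3, 5, 7].find? (fun x => PySem.Int.mod m x = 0) = some p := by
        intro m hq hpm
        rw [← hsplit, List.find?_append, hqsnone m hq]
        simp [PySem.Int.mod_eq_zero_iff_dvd, hpm]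
      have hmul : ∀ (m : Int), p ∣ m → p * PySem.Int.floordiv m p = m := by
        intro m hpm
        rw [PySem.Int.floordiv_eq_ediv_of_pos (by omega)]
        exact Int.mul_ediv_cancel' hpm
      have hne1 : ∀ (m : Int), p ∣ m → m ≠ 1 := by
        intro m hpm h1
        exact pv_not_dvd_one hp2 (h1 ▸ hpm)
      have inner : ∀ (k : Nat) (m e : Int), m.natAbs ≤ k → m ≠ 0 → (∀ q ∈ qs, ¬ q ∣ m) →
          pvLoopB m (d.insert p e) =
            pvRunA ps' (pvDivLoopA p m e).1 (d.insert p (pvDivLoopA p m e).2) := by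
        intro k
        induction k with
        | zero => intro m e hk hm _; omega
        | succ k ihk =>
          intro m e hk hm hq
          by_cases hpm : p ∣ m
          · have hm1 : m ≠ 1 := hne1 m hpm
            set t := PySem.Int.floordiv m p with ht
            have htm : p * t = m := hmul m hpm
            have ht0 : t ≠ 0 := by
              intro h
              apply hm
              rw [h, mul_zero] at htm
              exact htm.symm
            have hlt := pvFloordivAbsLt hp2 hm hpm
            have hk' : t.natAbs ≤ k := by rw [ht]; omega
            have hqt : ∀ q ∈ qs, ¬ q ∣ t := by
              intro q hq' hdt
              exact hq q hq' (htm ▸ hdt.mul_left p)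
            rw [pvLoopB_step hm1 (hfindsome m hq hpm) ⟨hp2, hm⟩,
              PySem.Dict.getD_insert_self, PySem.Dict.insert_insert_self,
              pvDivLoopA_unfold_pos hp2 hm hpm e, ← ht]
            exact ihk t (e + 1) hk' ht0 hqt
          · rw [pvDivLoopA_unfold_neg hpm e]
            by_cases hm1 : m = 1
            · subst hm1
              rw [pvLoopB, if_pos rfl]
              exact (pvRunA_one ps' (d.insert p e) hps'2).symm
            · apply ih (qs ++ [p]) m (d.insert p e) hm hsplit'
              · intro q hq'
                rcases List.mem_append.mp hq' with h | h
                · exact hq q h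
                · simpa using (by simpa using h : q = p) ▸ hpm
              · intro r hr
                have hrp : r ≠ p := fun h => hpps' (h ▸ hr)
                rw [PySem.Dict.contains_insert]
                simp [hrp, hd r (by simp [hr])]
      -- one B-step, then the counter lemma at e = 1
      set t := PySem.Int.floordiv n p with ht
      have htm : p * t = n := hmul n hdvd
      have ht0 : t ≠ 0 := by
        intro h
        apply hn
        rw [h, mul_zero] at htm
        exact htm.symm
      have hqt : ∀ q ∈ qs, ¬ q ∣ t := by
        intro q hq' hdt
        exact hqs q hq' (htm ▸ hdt.mul_left p)
      have hB : pvLoopB n d = pvLoopB t (d.insert p 1) := by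
        rw [pvLoopB_step hn1 (hfindsome n hqs hdvd) ⟨hp2, hn⟩,
          PySem.Dict.getD_of_not_contains d 0 (hd p (by simp)), zero_add, ← ht]
      have hsnd : (pvDivLoopA p t 1).2 > 0 := by
        rw [pvDivLoopA_shift p t.natAbs t le_rfl 1]
        have := pvDivLoopA_snd_nonneg p t.natAbs t le_rfl
        simp
        omega
      rw [hB, inner t.natAbs t 1 le_rfl ht0 hqt, pvRunA_cons,
        pvDivLoopA_unfold_pos hp2 hn hdvd 0, ← ht]
      simp only [zero_add]
      rw [if_pos hsnd]
    · -- p does not divide n: A's p-loop is a no-op and B's search skips p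
      rw [pvRunA_cons, pvDivLoopA_unfold_neg hdvd 0]
      simp only [gt_iff_lt, lt_self_iff_false, if_false]
      apply ih (qs ++ [p]) n d hn hsplit'
      · intro q hq'
        rcases List.mem_append.mp hq' with h | h
        · exact hqs q h
        · simpa using (by simpa using h : q = p) ▸ hdvd
      · intro r hr
        exact hd r (by simp [hr])

-- ===== VERDICT (by name: the statement is the Claim_ definition above) =====
theorem factorize_7smooth_spec : Claim_equal_factorize_7smooth := by
  intro n _ hn
  unfold Spec_factorize_7smooth
  rw [pvRunA_eq, factorize_7smooth_alt,
    pvLoopB_eq_runA [2, 3, 5, 7] [] n PySem.Dict.empty hn rfl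
      (by simp) (by intro p _; simp)]
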